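-- pv_equiv track=rewrite | github.com/Peich-Liu/ECGAnalyzeBox | test2.py | find_events
-- ===== SOURCE A (Python) =====
-- def find_events(sequence, sample_indices, min_event_length=3, merge_gap=1):
--     """
--     根据二进制序列sequence(如pred_thresh)识别事件。
--     - min_event_length: 事件最短窗口数，短于此长度的事件被过滤掉
--     - merge_gap: 如果两个事件之间的空隙小于或等于此值，将它们合并为一个事件
--     返回事件列表，每个事件是一个字典，包含起始索引、结束索引、持续窗口数和对应的sample_index范围。
--     """
--     events = []
--     in_event = False
--     start_idx = None
--     for i, val in enumerate(sequence):
--         if val == 1 and not in_event: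
--             # 事件开始
--             in_event = True
--             start_idx = i
--         elif val == 0 and in_event:
--             # 事件结束
--             end_idx = i - 1
--             length = end_idx - start_idx + 1
--             if length >= min_event_length:
--                 events.append({
--                     'start': start_idx,
--                     'end': end_idx,
--                     'length': length,
--                     'start_sample': sample_indices[start_idx],
--                     'end_sample': sample_indices[end_idx]
--                 })
--             in_event = False
--     # 若最后仍在事件中闭合
--     if in_event:
--         end_idx = len(sequence) - 1
--         length = end_idx - start_idx + 1
--         if length >= min_event_length:
--             events.append({
--                 'start': start_idx,
--                 'end': end_idx,
--                 'length': length,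
--                 'start_sample': sample_indices[start_idx],
--                 'end_sample': sample_indices[end_idx]
--             })
--
--     # 合并过近事件
--     merged_events = []
--     if events:
--         events = sorted(events, key=lambda x: x['start'])
--         current_event = events[0]
--         for e in events[1:]:
--             if e['start'] - current_event['end'] <= merge_gap:
--                 # 合并事件
--                 current_event['end'] = e['end']
--                 current_event['end_sample'] = e['end_sample']
--                 current_event['length'] = current_event['end'] - current_event['start'] + 1
--             else:
--                 merged_events.append(current_event)
--                 current_event = e
--         merged_events.append(current_event)
--
--     return merged_events
-- ===== SOURCE B (Python) =====
-- def find_events(sequence, sample_indices, min_event_length=3, merge_gap=1):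
--     """Single fused pass: detect runs of 1s and merge on the fly.
--
--     Keeps one pending merged event as a (start, end, start_sample, end_sample)
--     tuple; dicts are only built when an event is finalized. No intermediate
--     event list, no sort.
--     """
--     merged = []
--     current = None          # (start, end, start_sample, end_sample) or None
--     run_start = None
--
--     def close_run(s, e, current):
--         if e - s + 1 < min_event_length:
--             return current
--         if current is not None:
--             cs, ce, css, ces = current
--             if s - ce <= merge_gap:
--                 return (cs, e, css, sample_indices[e])
--             merged.append({'start': cs, 'end': ce, 'length': ce - cs + 1,
--                            'start_sample': css, 'end_sample': ces})
--         return (s, e, sample_indices[s], sample_indices[e])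
--
--     for i, val in enumerate(sequence):
--         if val == 1 and run_start is None:
--             run_start = i
--         elif val == 0 and run_start is not None:
--             current = close_run(run_start, i - 1, current)
--             run_start = None
--     if run_start is not None:
--         current = close_run(run_start, len(sequence) - 1, current)
--
--     if current is not None:
--         cs, ce, css, ces = current
--         merged.append({'start': cs, 'end': ce, 'length': ce - cs + 1,
--                        'start_sample': css, 'end_sample': ces})
--     return merged
-- ===== Notes on version B (the rewrite author's own statement) =====
-- stated objective: simpler
-- what changed: B replaces A's three stages (build an event-dict list, re-sort it, then a separate merge loop) by one fused pass that keeps a single pending merged event as a tuple and builds each output dict only when it is flushed; the intermediate list and the sort disappear.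
import Mathlib
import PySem

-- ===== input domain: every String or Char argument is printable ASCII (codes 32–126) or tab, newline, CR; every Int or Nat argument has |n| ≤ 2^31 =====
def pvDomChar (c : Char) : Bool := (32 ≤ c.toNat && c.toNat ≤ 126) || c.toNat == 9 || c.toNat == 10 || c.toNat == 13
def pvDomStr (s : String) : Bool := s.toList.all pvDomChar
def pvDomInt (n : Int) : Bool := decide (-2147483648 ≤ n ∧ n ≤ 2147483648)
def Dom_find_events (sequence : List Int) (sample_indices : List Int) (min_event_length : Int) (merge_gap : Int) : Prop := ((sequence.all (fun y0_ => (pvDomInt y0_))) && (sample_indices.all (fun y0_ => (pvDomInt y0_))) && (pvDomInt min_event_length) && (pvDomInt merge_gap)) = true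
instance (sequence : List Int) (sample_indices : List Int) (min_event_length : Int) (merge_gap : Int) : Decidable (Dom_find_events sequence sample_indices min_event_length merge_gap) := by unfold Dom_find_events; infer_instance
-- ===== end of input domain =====

-- B fuses run detection and merging into one pass over the sequence (tuple-state
-- 'current' event, dict built only on flush), removing A's intermediate event
-- list and its redundant sort; objective: simpler (same O(n) cost).

-- ===== PORT A =====
-- Python dict literal {'start': …, 'end': …, 'length': …, 'start_sample': …, 'end_sample': …}
-- as an assoc list in insertion order (length is computed as end-start+1 before the append, as in A)
def aEvent (sample_indices : List Int) (s e : Int) : List (String × Int) :=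
  [("start", s), ("end", e), ("length", e - s + 1),
   ("start_sample", (PySem.List.pyGet? sample_indices s).getD 0),
   ("end_sample", (PySem.List.pyGet? sample_indices e).getD 0)]

-- d[k] / d[k] = v on these fixed-key dicts (exact: keys are always present here and
-- Python's overwrite keeps the key's position; appended if absent, like Python)
def dget (d : List (String × Int)) (k : String) : Int :=
  match d with
  | [] => 0
  | (k', v) :: rest => if k' = k then v else dget rest k

def dset (d : List (String × Int)) (k : String) (v : Int) : List (String × Int) :=
  match d with
  | [] => [(k, v)]
  | (k', v') :: rest => if k' = k then (k', v) :: rest else (k', v') :: dset rest k v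

-- phase 1: the 'for i, val in enumerate(sequence)' loop plus the final 'if in_event' close;
-- state = (in_event, start_idx); the [] case is the code after the loop (seqLen = len(sequence))
def aScan (sample_indices : List Int) (min_event_length seqLen : Int) :
    List Int → Nat → Bool → Int → List (List (String × Int))
  | [], _i, inEvent, start =>
      if inEvent then
        (if min_event_length ≤ (seqLen - 1) - start + 1 then
          [aEvent sample_indices start (seqLen - 1)] else [])
      else []
  | v :: rest, i, inEvent, start =>
      if v = 1 ∧ inEvent = false then
        aScan sample_indices min_event_length seqLen rest (i + 1) true (i : Int)
      else if v = 0 ∧ inEvent = true then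
        (if min_event_length ≤ ((i : Int) - 1) - start + 1 then
          [aEvent sample_indices start ((i : Int) - 1)] else [])
          ++ aScan sample_indices min_event_length seqLen rest (i + 1) false start
      else
        aScan sample_indices min_event_length seqLen rest (i + 1) inEvent start

-- phase 2: the 'for e in events[1:]' merge loop plus the trailing append of current_event
def aMerge (merge_gap : Int) : List (String × Int) → List (List (String × Int)) → List (List (String × Int))
  | cur, [] => [cur]
  | cur, e :: rest =>
      if dget e "start" - dget cur "end" ≤ merge_gap then
        let c1 := dset cur "end" (dget e "end")
        let c2 := dset c1 "end_sample" (dget e "end_sample")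
        let c3 := dset c2 "length" (dget c2 "end" - dget c2 "start" + 1)
        aMerge merge_gap c3 rest
      else
        cur :: aMerge merge_gap e rest

def find_events (sequence : List Int) (sample_indices : List Int) (min_event_length : Int) (merge_gap : Int) : List (List (String × Int)) :=
  let events := aScan sample_indices min_event_length (sequence.length : Int) sequence 0 false 0
  match events with
  | [] => []   -- 'if events:' is false → merged_events stays []
  | _ :: _ =>
    match PySem.List.sorted events (fun x => dget x "start") with
    | [] => []  -- unreachable: sorted of a nonempty list
    | c :: rest => aMerge merge_gap c rest

-- ===== PORT B =====
def bEvent (s e ss es : Int) : List (String × Int) :=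
  [("start", s), ("end", e), ("length", e - s + 1), ("start_sample", ss), ("end_sample", es)]

-- close_run: length-filter the run [s,e], then merge it into / flush the pending tuple
def bClose (sample_indices : List Int) (min_event_length merge_gap : Int) (s e : Int)
    (cur : Option (Int × Int × Int × Int)) (acc : List (List (String × Int))) :
    List (List (String × Int)) × Option (Int × Int × Int × Int) :=
  if e - s + 1 < min_event_length then (acc, cur)
  else
    match cur with
    | none =>
        (acc, some (s, e, (PySem.List.pyGet? sample_indices s).getD 0,
                          (PySem.List.pyGet? sample_indices e).getD 0))
    | some (cs, ce, css, ces) =>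
        if s - ce ≤ merge_gap then
          (acc, some (cs, e, css, (PySem.List.pyGet? sample_indices e).getD 0))
        else
          (acc ++ [bEvent cs ce css ces],
           some (s, e, (PySem.List.pyGet? sample_indices s).getD 0,
                       (PySem.List.pyGet? sample_indices e).getD 0))

-- the single fused pass; state = (run_start, current, merged); the [] case is the
-- final close (seqLen = len(sequence)) and the flush of current
def bScan (sample_indices : List Int) (min_event_length merge_gap seqLen : Int) :
    List Int → Nat → Option Int → Option (Int × Int × Int × Int) →
    List (List (String × Int)) → List (List (String × Int))
  | [], _i, runStart, cur, acc =>
      let p := match runStart with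
        | some s => bClose sample_indices min_event_length merge_gap s (seqLen - 1) cur acc
        | none => (acc, cur)
      match p.2 with
      | none => p.1
      | some (cs, ce, css, ces) => p.1 ++ [bEvent cs ce css ces]
  | v :: rest, i, runStart, cur, acc =>
      match runStart with
      | none =>
          if v = 1 then
            bScan sample_indices min_event_length merge_gap seqLen rest (i + 1) (some (i : Int)) cur acc
          else
            bScan sample_indices min_event_length merge_gap seqLen rest (i + 1) none cur acc
      | some s =>
          if v = 0 then
            let p := bClose sample_indices min_event_length merge_gap s ((i : Int) - 1) cur acc
            bScan sample_indices min_event_length merge_gap seqLen rest (i + 1) none p.2 p.1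
          else
            bScan sample_indices min_event_length merge_gap seqLen rest (i + 1) (some s) cur acc

def find_events_alt (sequence : List Int) (sample_indices : List Int) (min_event_length : Int) (merge_gap : Int) : List (List (String × Int)) :=
  bScan sample_indices min_event_length merge_gap (sequence.length : Int) sequence 0 none none []

-- ===== PRECONDITION & SPEC =====
-- Pre_ excludes exactly the inputs on which A raises IndexError: some kept event's
-- end index j (end of a maximal run of 1s of length ≥ min_event_length) reaches
-- sample_indices[j] out of range. j ranges over run ends (next value 0 or end of list);
-- s is that run's start (a 1, no 0 up to j, every earlier 1 separated by a 0).
def Pre_find_events (sequence : List Int) (sample_indices : List Int) (min_event_length : Int) (merge_gap : Int) : Prop :=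
  ∀ j ∈ List.range sequence.length,
    ((j + 1 = sequence.length ∨ sequence.getD (j + 1) 0 = 0) ∧
     ∃ s ∈ List.range (j + 1),
       sequence.getD s 0 = 1 ∧
       (∀ k ∈ List.range (j + 1), s < k → sequence.getD k 0 ≠ 0) ∧
       (∀ k ∈ List.range s, sequence.getD k 0 = 1 →
          ∃ z ∈ List.range s, k < z ∧ sequence.getD z 0 = 0) ∧
       min_event_length ≤ (j : Int) - (s : Int) + 1) →
    j < sample_indices.length

instance (sequence : List Int) (sample_indices : List Int) (min_event_length : Int) (merge_gap : Int) : Decidable (Pre_find_events sequence sample_indices min_event_length merge_gap) := by unfold Pre_find_events; infer_instance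

def pvWitness_find_events : List Int × List Int × Int × Int :=
  ([1, 1, 1, 0, 1, 1], [10, 20, 30, 40, 50, 60], 2, 1)

def Spec_find_events (sequence : List Int) (sample_indices : List Int) (min_event_length : Int) (merge_gap : Int) (out : List (List (String × Int))) : Prop := out = find_events_alt sequence sample_indices min_event_length merge_gap
instance (sequence : List Int) (sample_indices : List Int) (min_event_length : Int) (merge_gap : Int) (out : List (List (String × Int))) : Decidable (Spec_find_events sequence sample_indices min_event_length merge_gap out) := by unfold Spec_find_events; infer_instance

-- ===== CLAIM (what is proved, stated in full; the proofs are below) =====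
def Claim_equal_find_events : Prop := ∀ (sequence : List Int) (sample_indices : List Int) (min_event_length : Int) (merge_gap : Int), Dom_find_events sequence sample_indices min_event_length merge_gap → Pre_find_events sequence sample_indices min_event_length merge_gap → Spec_find_events sequence sample_indices min_event_length merge_gap (find_events sequence sample_indices min_event_length merge_gap)

-- ===== LEMMAS AND PROOFS =====

-- sample lookup abbreviation
def gS (sample_indices : List Int) (i : Int) : Int := (PySem.List.pyGet? sample_indices i).getD 0

-- the qualifying runs (start, end) both phases are about; state = optional run start
def runsOf (min_event_length seqLen : Int) : List Int → Nat → Option Int → List (Int × Int)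
  | [], _i, none => []
  | [], _i, some s =>
      if min_event_length ≤ (seqLen - 1) - s + 1 then [(s, seqLen - 1)] else []
  | v :: rest, i, none =>
      if v = 1 then runsOf min_event_length seqLen rest (i + 1) (some (i : Int))
      else runsOf min_event_length seqLen rest (i + 1) none
  | v :: rest, i, some s =>
      if v = 0 then
        (if min_event_length ≤ ((i : Int) - 1) - s + 1 then [(s, (i : Int) - 1)] else [])
          ++ runsOf min_event_length seqLen rest (i + 1) none
      else runsOf min_event_length seqLen rest (i + 1) (some s)

-- A's merge loop on the abstract tuple state (cs, ce, css, ces)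
def mergeT (sample_indices : List Int) (merge_gap : Int) :
    Int × Int × Int × Int → List (Int × Int) → List (List (String × Int))
  | (cs, ce, css, ces), [] => [bEvent cs ce css ces]
  | (cs, ce, css, ces), (s, e) :: R =>
      if s - ce ≤ merge_gap then
        mergeT sample_indices merge_gap (cs, e, css, gS sample_indices e) R
      else
        bEvent cs ce css ces :: mergeT sample_indices merge_gap (s, e, gS sample_indices s, gS sample_indices e) R

def mergeO (sample_indices : List Int) (merge_gap : Int) :
    Option (Int × Int × Int × Int) → List (Int × Int) → List (List (String × Int))
  | none, [] => []
  | none, (s, e) :: R => mergeT sample_indices merge_gap (s, e, gS sample_indices s, gS sample_indices e) R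
  | some c, R => mergeT sample_indices merge_gap c R

lemma aEvent_eq (si : List Int) (s e : Int) :
    aEvent si s e = bEvent s e (gS si s) (gS si e) := rfl

-- phase 1 of A produces exactly the dicts of the qualifying runs
lemma aScan_eq_runs (si : List Int) (mel L : Int) :
    ∀ (seq : List Int) (i : Nat) (b : Bool) (st : Int),
      aScan si mel L seq i b st
        = (runsOf mel L seq i (if b then some st else none)).map (fun p => aEvent si p.1 p.2) := by
  intro seq
  induction seq with
  | nil =>
      intro i b st
      cases b <;> simp [aScan, runsOf] <;> (try split_ifs) <;> simp
  | cons v rest ih =>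
      intro i b st
      cases b with
      | false =>
          by_cases h1 : v = 1
          · simp [aScan, runsOf, h1, ih]
          · simp [aScan, runsOf, h1, ih]
      | true =>
          by_cases h0 : v = 0
          · have h1 : ¬ (v = 1 ∧ true = false) := by simp
            simp only [aScan, runsOf, h0, if_true]
            simp [ih]
            split_ifs <;> simp
          · by_cases h1 : v = 1 <;> simp [aScan, runsOf, h0, h1, ih]

-- lower bound on run starts
lemma runs_lb (mel L : Int) :
    ∀ (seq : List Int) (i : Nat) (rs : Option Int),
      (∀ s, rs = some s → s ≤ (i : Int)) →
      ∀ p ∈ runsOf mel L seq i rs,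
        (match rs with | some s => s | none => (i : Int)) ≤ p.1 := by
  intro seq
  induction seq with
  | nil =>
      intro i rs h p hp
      cases rs with
      | none => simp [runsOf] at hp
      | some s =>
          simp only [runsOf] at hp
          split_ifs at hp <;> simp at hp
          simp [hp]
  | cons v rest ih =>
      intro i rs h p hp
      cases rs with
      | none =>
          simp only [runsOf] at hp
          split_ifs at hp with h1
          · have := ih (i + 1) (some (i : Int)) (by intro s hs; cases hs; push_cast; omega) p hp
            simpa using this
          · have := ih (i + 1) none (by simp) p hp
            push_cast at this ⊢; omega
      | some s =>
          have hs : s ≤ (i : Int) := h s rfl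
          simp only [runsOf] at hp
          split_ifs at hp with h0 hq
          · rcases List.mem_append.1 hp with hp | hp
            · simp at hp
              show s ≤ p.1
              simp [hp]
            · have := ih (i + 1) none (by simp) p hp
              show s ≤ p.1
              simp only at this; push_cast at this ⊢; omega
          · simp only [List.nil_append] at hp
            have := ih (i + 1) none (by simp) p hp
            show s ≤ p.1
            simp only at this; push_cast at this ⊢; omega
          · have := ih (i + 1) (some s) (by intro t ht; cases ht; push_cast; omega) p hp
            simpa using this

-- run starts are strictly increasing
lemma runs_pairwise (mel L : Int) :
    ∀ (seq : List Int) (i : Nat) (rs : Option Int),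
      (∀ s, rs = some s → s ≤ (i : Int)) →
      List.Pairwise (fun p q => p.1 < q.1) (runsOf mel L seq i rs) := by
  intro seq
  induction seq with
  | nil =>
      intro i rs h
      cases rs with
      | none => simp [runsOf]
      | some s => simp only [runsOf]; split_ifs <;> simp
  | cons v rest ih =>
      intro i rs h
      cases rs with
      | none =>
          simp only [runsOf]
          split_ifs with h1
          · exact ih (i + 1) (some (i : Int)) (by intro s hs; cases hs; push_cast; omega)
          · exact ih (i + 1) none (by simp)
      | some s =>
          have hs : s ≤ (i : Int) := h s rfl
          simp only [runsOf]
          split_ifs with h0 hq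
          · simp only [List.singleton_append, List.pairwise_cons]
            constructor
            · intro q hq'
              have := runs_lb mel L rest (i + 1) none (by simp) q hq'
              simp only at this
              push_cast at this ⊢; omega
            · exact ih (i + 1) none (by simp)
          · simpa using ih (i + 1) none (by simp)
          · exact ih (i + 1) (some s) (by intro t ht; cases ht; push_cast; omega)

-- A's dict-level merge loop is mergeT on the tuple state
lemma aMerge_eq_mergeT (si : List Int) (gap : Int) :
    ∀ (R : List (Int × Int)) (cs ce css ces : Int),
      aMerge gap (bEvent cs ce css ces) (R.map (fun p => aEvent si p.1 p.2))
        = mergeT si gap (cs, ce, css, ces) R := by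
  intro R
  induction R with
  | nil => intro cs ce css ces; rfl
  | cons p R ih =>
      intro cs ce css ces
      obtain ⟨s, e⟩ := p
      simp only [List.map_cons, aMerge, mergeT]
      have hstart : dget (aEvent si s e) "start" = s := rfl
      have hend : dget (bEvent cs ce css ces) "end" = ce := rfl
      rw [hstart, hend]
      split_ifs with hg
      · rw [show (dget (aEvent si s e) "end") = e from rfl,
            show (dget (aEvent si s e) "end_sample") = gS si e from rfl]
        have h2 : dset (dset (bEvent cs ce css ces) "end" e) "end_sample" (gS si e)
            = [("start", cs), ("end", e), ("length", ce - cs + 1), ("start_sample", css), ("end_sample", gS si e)] := rfl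
        rw [h2]
        have h3 : dset [("start", cs), ("end", e), ("length", ce - cs + 1), ("start_sample", css), ("end_sample", gS si e)]
            "length" (dget [("start", cs), ("end", e), ("length", ce - cs + 1), ("start_sample", css), ("end_sample", gS si e)] "end"
              - dget [("start", cs), ("end", e), ("length", ce - cs + 1), ("start_sample", css), ("end_sample", gS si e)] "start" + 1)
            = bEvent cs e css (gS si e) := rfl
        rw [h3, ih]
      · rw [aEvent_eq, ih]

-- fusing B's single pass: bScan = (done events) ++ merge of the remaining runs
lemma bScan_eq_mergeO (si : List Int) (mel gap L : Int) :
    ∀ (seq : List Int) (i : Nat) (rs : Option Int) (cur : Option (Int × Int × Int × Int))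
      (acc : List (List (String × Int))),
      bScan si mel gap L seq i rs cur acc
        = acc ++ mergeO si gap cur (runsOf mel L seq i rs) := by
  intro seq
  induction seq with
  | nil =>
      intro i rs cur acc
      cases rs with
      | none =>
          cases cur with
          | none => simp [bScan, runsOf, mergeO]
          | some c => obtain ⟨cs, ce, css, ces⟩ := c; simp [bScan, runsOf, mergeO, mergeT]
      | some s =>
          simp only [bScan, runsOf, bClose]
          by_cases hq : mel ≤ (L - 1) - s + 1
          · have hq' : ¬ ((L - 1) - s + 1 < mel) := by omega
            cases cur with
            | none => simp [hq, hq', mergeO, mergeT, gS]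
            | some c =>
                obtain ⟨cs, ce, css, ces⟩ := c
                by_cases hg : s - ce ≤ gap
                · simp [hq, hq', hg, mergeO, mergeT, gS]
                · simp [hq, hq', hg, mergeO, mergeT, gS]
          · have hq' : (L - 1) - s + 1 < mel := by omega
            cases cur with
            | none => simp [hq, hq', mergeO]
            | some c => obtain ⟨cs, ce, css, ces⟩ := c; simp [hq, hq', mergeO, mergeT]
  | cons v rest ih =>
      intro i rs cur acc
      cases rs with
      | none =>
          simp only [bScan, runsOf]
          by_cases h1 : v = 1
          · simp [h1, ih]
          · simp [h1, ih]
      | some s =>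
          simp only [bScan, runsOf]
          by_cases h0 : v = 0
          · simp only [h0, if_true, bClose]
            by_cases hq : mel ≤ ((i : Int) - 1) - s + 1
            · have hq' : ¬ (((i : Int) - 1) - s + 1 < mel) := by omega
              cases cur with
              | none =>
                  simp only [hq, hq', if_true, if_false]
                  rw [ih]
                  simp [mergeO, gS]
              | some c =>
                  obtain ⟨cs, ce, css, ces⟩ := c
                  by_cases hg : s - ce ≤ gap
                  · simp only [hq, hq', hg, if_true, if_false]
                    rw [ih]
                    simp [mergeO, mergeT, gS]
                    intro h; exact absurd hg (by omega)
                  · simp only [hq, hq', hg, if_true, if_false]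
                    rw [ih]
                    simp [mergeO, mergeT, gS]
                    intro h; exact absurd (show s - ce ≤ gap by omega) hg
            · have hq' : ((i : Int) - 1) - s + 1 < mel := by omega
              cases cur with
              | none =>
                  simp only [hq, hq', if_true, if_false]
                  rw [ih]; simp [mergeO]
              | some c =>
                  obtain ⟨cs, ce, css, ces⟩ := c
                  simp only [hq, hq', if_true, if_false]
                  rw [ih]; simp [mergeO]
          · simp [h0, ih]

-- ===== VERDICT (by name: the statement is the Claim_ definition above) =====
theorem find_events_spec : Claim_equal_find_events := by
  intro sequence sample_indices mel gap _hdom _hpre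
  unfold Spec_find_events find_events find_events_alt
  rw [aScan_eq_runs]
  rw [bScan_eq_mergeO]
  simp only [if_neg Bool.false_ne_true, List.nil_append]
  have hpw : List.Pairwise (fun p q : Int × Int => p.1 < q.1)
      (runsOf mel (sequence.length : Int) sequence 0 none) :=
    runs_pairwise mel _ sequence 0 none (by simp)
  cases hR : runsOf mel (sequence.length : Int) sequence 0 none with
  | nil => simp [mergeO]
  | cons p R =>
      obtain ⟨s, e⟩ := p
      rw [hR] at hpw
      have hsorted : PySem.List.sorted (((s, e) :: R).map (fun p => aEvent sample_indices p.1 p.2))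
          (fun x => dget x "start") false = ((s, e) :: R).map (fun p => aEvent sample_indices p.1 p.2) := by
        apply PySem.List.sorted_eq_of_perm_of_pairwise_lt
        · exact List.Perm.refl _
        · rw [List.pairwise_map]
          refine hpw.imp ?_
          intro a b hab
          simpa [dget, aEvent] using hab
      simp only [List.map_cons]
      rw [show PySem.List.sorted (aEvent sample_indices s e :: R.map (fun p => aEvent sample_indices p.1 p.2)) (fun x => dget x "start") = ((s, e) :: R).map (fun p => aEvent sample_indices p.1 p.2) from hsorted]
      simp only [List.map_cons]
      rw [aEvent_eq, aMerge_eq_mergeT]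
      simp [mergeO]
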